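-- pv_equiv track=rewrite | github.com/airabino/charger_network_analysis | src/floyd_warshall.py | recover_tree
-- ===== SOURCE A (Python) =====
-- def recover_tree(predecessors, origin, destinations, tree):
--
--     if len(destinations) == 0:
--
--         return tree
--
--     destination = destinations.pop()
--
--     # If the origin is the destination then move to next branch in queue
--     if origin == destination:
--
--         return recover_tree(predecessors, origin, destinations, tree)
--
--     # If the origin is not the destination then add edges to tree and queue
--     else:
--
--         for predecessor in predecessors[origin][destination]:
--
--             tree.append((predecessor, destination))
--             destinations.append(predecessor)
--
--         return recover_tree(predecessors, origin, destinations, tree)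
-- ===== SOURCE B (Python) =====
-- def recover_tree(predecessors, origin, destinations, tree):
--     # Recursive DFS per destination; builds the edge list functionally
--     # (does not mutate `destinations`/`tree` like the original; same return value).
--     def edges_from(destination):
--         if destination == origin:
--             return []
--         preds = predecessors[origin][destination]
--         edges = [(p, destination) for p in preds]
--         for p in reversed(preds):
--             edges += edges_from(p)
--         return edges
--
--     result = list(tree)
--     for destination in reversed(destinations):
--         result += edges_from(destination)
--     return result
-- ===== Notes on version B (the rewrite author's own statement) =====
-- stated objective: alternative
-- what changed: A's worklist-stack tail recursion (pop a destination, push its predecessors back onto the shared queue, append edges to the shared tree) is replaced by a per-destination recursive DFS helper that builds each subtree's edge list functionally and concatenates them; nothing is mutated.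
import Mathlib
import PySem

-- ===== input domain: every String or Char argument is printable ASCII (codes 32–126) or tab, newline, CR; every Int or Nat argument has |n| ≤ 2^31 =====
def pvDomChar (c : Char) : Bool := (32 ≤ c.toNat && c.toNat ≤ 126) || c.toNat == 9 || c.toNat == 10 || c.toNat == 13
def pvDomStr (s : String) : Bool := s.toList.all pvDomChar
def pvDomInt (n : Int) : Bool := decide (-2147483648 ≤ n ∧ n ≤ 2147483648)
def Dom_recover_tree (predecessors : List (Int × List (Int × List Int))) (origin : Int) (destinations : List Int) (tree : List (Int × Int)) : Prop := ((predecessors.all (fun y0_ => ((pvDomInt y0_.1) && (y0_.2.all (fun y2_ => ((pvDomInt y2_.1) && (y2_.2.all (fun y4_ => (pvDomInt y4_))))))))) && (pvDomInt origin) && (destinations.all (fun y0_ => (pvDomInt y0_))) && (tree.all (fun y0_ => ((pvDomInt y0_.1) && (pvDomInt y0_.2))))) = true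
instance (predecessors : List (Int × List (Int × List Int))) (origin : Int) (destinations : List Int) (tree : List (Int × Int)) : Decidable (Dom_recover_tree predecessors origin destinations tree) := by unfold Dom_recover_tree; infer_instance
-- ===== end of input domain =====

-- B replaces A's worklist-stack tail recursion by a per-destination recursive DFS that builds the
-- edge list functionally (objective: alternative decomposition, same cost). A mutates `destinations`
-- (empties it) and appends to `tree` in place; B does not — the equivalence is about the return value.

-- first-match association-list lookup: exact model of Python dict indexing `d[k]` (none = KeyError)
def pvGet? {β : Type} (l : List (Int × β)) (k : Int) : Option β :=
  l.lookup k

-- `predecessors[origin]` / `row[d]`; the `.getD []` default is unreachable under Pre_ (KeyError excluded)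
def pvRow (predecessors : List (Int × List (Int × List Int))) (origin : Int) : List (Int × List Int) :=
  (pvGet? predecessors origin).getD []

def pvPreds (row : List (Int × List Int)) (d : Int) : List Int :=
  (pvGet? row d).getD []

-- all predecessor values appearing in origin's row (the recursion can only ever visit these,
-- besides the initial destinations); its length bounds the fuel both ports need under Pre_
def pvVals (predecessors : List (Int × List (Int × List Int))) (origin : Int) : List Int :=
  (pvRow predecessors origin).flatMap (fun kv => kv.2)

-- ===== PORT A =====
-- totality guard for A's recursion: number of iterations A performs when it terminates
-- (computed up front as fuel; under Pre_ the fuel is exact and never runs out)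
def recover_tree_cost (row : List (Int × List Int)) (origin : Int) : Nat → Int → Nat
  | 0, _ => 0
  | fuel + 1, d =>
    if origin = d then 1
    else 1 + ((pvPreds row d).map (recover_tree_cost row origin fuel)).sum

-- literal transliteration of A: pop from the end, push predecessors, accumulate edges in `tree`
def recover_tree_loop (predecessors : List (Int × List (Int × List Int))) (origin : Int) :
    Nat → List Int → List (Int × Int) → List (Int × Int)
  | 0, _, tree => tree   -- fuel exhaustion, unreachable under Pre_
  | fuel + 1, destinations, tree =>
    if h : destinations = [] then tree
    else
      let destination := destinations.getLast h      -- destinations.pop()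
      let rest := destinations.dropLast
      if origin = destination then
        recover_tree_loop predecessors origin fuel rest tree
      else
        -- for predecessor in predecessors[origin][destination]: tree.append(...); destinations.append(...)
        let s := (pvPreds (pvRow predecessors origin) destination).foldl
          (fun acc p => (acc.1 ++ [(p, destination)], acc.2 ++ [p])) (tree, rest)
        recover_tree_loop predecessors origin fuel s.2 s.1

def recover_tree (predecessors : List (Int × List (Int × List Int))) (origin : Int) (destinations : List Int) (tree : List (Int × Int)) : List (Int × Int) :=
  recover_tree_loop predecessors origin
    ((destinations.map (recover_tree_cost (pvRow predecessors origin) origin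
      ((pvVals predecessors origin).length + 2))).sum) destinations tree

-- ===== PORT B =====
-- edges_from(destination): under Pre_ the recursion depth is bounded by the number of
-- predecessor values in origin's row, so `(pvVals …).length + 1` fuel never runs out
def recover_tree_edges (predecessors : List (Int × List (Int × List Int))) (origin : Int) :
    Nat → Int → List (Int × Int)
  | 0, _ => []   -- fuel exhaustion, unreachable under Pre_
  | fuel + 1, destination =>
    if destination = origin then []
    else
      let preds := pvPreds (pvRow predecessors origin) destination
      (preds.map (fun p => (p, destination))) ++
        preds.reverse.foldl (fun acc p => acc ++ recover_tree_edges predecessors origin fuel p) []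

def recover_tree_alt (predecessors : List (Int × List (Int × List Int))) (origin : Int) (destinations : List Int) (tree : List (Int × Int)) : List (Int × Int) :=
  destinations.reverse.foldl
    (fun acc d => acc ++ recover_tree_edges predecessors origin ((pvVals predecessors origin).length + 1) d)
    tree

-- ===== PRECONDITION & SPEC =====
-- reachability closure over the predecessor graph of origin's row (worklist with dedup;
-- the fuel is a pigeonhole bound, so the result is the exact closure)
def pvAddNew (T : List Int) (x : Int) : List Int := if x ∈ T then T else T ++ [x]
def pvDedup (L : List Int) : List Int := L.foldl pvAddNew []
def pvStep (succs : Int → List Int) (S : List Int) : List Int := (S.flatMap succs).foldl pvAddNew S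
def pvIter (succs : Int → List Int) : Nat → List Int → List Int
  | 0, S => S
  | n + 1, S => pvIter succs n (pvStep succs S)

-- the nodes A pushes when it pops d: none if d is the origin, else predecessors[origin][d]
def pvSuccs (predecessors : List (Int × List (Int × List Int))) (origin : Int) (d : Int) : List Int :=
  if d = origin then [] else pvPreds (pvRow predecessors origin) d

-- all nodes A ever pops, starting from S0
def pvCl (predecessors : List (Int × List (Int × List Int))) (origin : Int) (S0 : List Int) : List Int :=
  pvIter (pvSuccs predecessors origin)
    ((pvDedup (S0 ++ pvVals predecessors origin)).length + 1) (pvDedup S0)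

-- Pre_ excludes exactly the inputs on which the Python A raises: KeyError (some node it pops is
-- neither the origin nor a key of predecessors[origin], or predecessors lacks the key origin while
-- a non-origin node is popped) or RecursionError (a popped node lies on a predecessor cycle, so the
-- recursion never terminates). pvCl is the set of nodes A pops; A returns normally iff Pre_ holds.
def Pre_recover_tree (predecessors : List (Int × List (Int × List Int))) (origin : Int) (destinations : List Int) (tree : List (Int × Int)) : Prop :=
  ∀ d ∈ pvCl predecessors origin destinations,
    (d = origin ∨ (origin ∈ predecessors.map Prod.fst ∧ d ∈ (pvRow predecessors origin).map Prod.fst)) ∧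
    d ∉ pvCl predecessors origin (pvSuccs predecessors origin d)

instance (predecessors : List (Int × List (Int × List Int))) (origin : Int) (destinations : List Int) (tree : List (Int × Int)) : Decidable (Pre_recover_tree predecessors origin destinations tree) := by
  unfold Pre_recover_tree; infer_instance

def pvWitness_recover_tree : (List (Int × List (Int × List Int))) × Int × List Int × (List (Int × Int)) :=
  ([(0, [(1, [0]), (2, [1, 0])])], 0, [2, 1], [])

def Spec_recover_tree (predecessors : List (Int × List (Int × List Int))) (origin : Int) (destinations : List Int) (tree : List (Int × Int)) (out : List (Int × Int)) : Prop := out = recover_tree_alt predecessors origin destinations tree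
instance (predecessors : List (Int × List (Int × List Int))) (origin : Int) (destinations : List Int) (tree : List (Int × Int)) (out : List (Int × Int)) : Decidable (Spec_recover_tree predecessors origin destinations tree out) := by unfold Spec_recover_tree; infer_instance

-- ===== CLAIM (what is proved, stated in full; the proofs are below) =====
def Claim_equal_recover_tree : Prop := ∀ (predecessors : List (Int × List (Int × List Int))) (origin : Int) (destinations : List Int) (tree : List (Int × Int)), Dom_recover_tree predecessors origin destinations tree → Pre_recover_tree predecessors origin destinations tree → Spec_recover_tree predecessors origin destinations tree (recover_tree predecessors origin destinations tree)

-- ===== LEMMAS AND PROOFS =====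

theorem mem_foldl_addNew {x : Int} : ∀ (L T : List Int), x ∈ T → x ∈ L.foldl pvAddNew T := by
  intro L
  induction L with
  | nil => intro T h; simpa using h
  | cons a L ih =>
    intro T h
    simp only [List.foldl_cons]
    refine ih (pvAddNew T a) ?_
    by_cases hm : a ∈ T
    · simpa [pvAddNew, hm] using h
    · simp only [pvAddNew, if_neg hm]
      exact List.mem_append_left _ h

theorem mem_foldl_addNew_of_mem_list {x : Int} : ∀ (L T : List Int), x ∈ L → x ∈ L.foldl pvAddNew T := by
  intro L
  induction L with
  | nil => intro T h; simp at h
  | cons a L ih =>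
    intro T h
    simp only [List.foldl_cons]
    rcases List.mem_cons.mp h with h | h
    · subst h
      refine mem_foldl_addNew _ _ ?_
      by_cases hm : x ∈ T
      · simp [pvAddNew, hm]
      · simp [pvAddNew, hm]
    · exact ih _ h

theorem mem_of_mem_foldl_addNew {x : Int} : ∀ (L T : List Int), x ∈ L.foldl pvAddNew T → x ∈ T ∨ x ∈ L := by
  intro L
  induction L with
  | nil => intro T h; exact Or.inl (by simpa using h)
  | cons a L ih =>
    intro T h
    simp only [List.foldl_cons] at h
    rcases ih _ h with h | h
    · by_cases hm : a ∈ T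
      · simp only [pvAddNew, if_pos hm] at h
        exact Or.inl h
      · simp only [pvAddNew, if_neg hm] at h
        rcases List.mem_append.mp h with h | h
        · exact Or.inl h
        · simp at h; subst h; exact Or.inr List.mem_cons_self
    · exact Or.inr (List.mem_cons_of_mem _ h)

theorem nodup_foldl_addNew : ∀ (L T : List Int), T.Nodup → (L.foldl pvAddNew T).Nodup := by
  intro L
  induction L with
  | nil => intro T h; simpa using h
  | cons a L ih =>
    intro T h
    simp only [List.foldl_cons]
    refine ih (pvAddNew T a) ?_
    by_cases hm : a ∈ T
    · simpa [pvAddNew, hm] using h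
    · simp only [pvAddNew, if_neg hm]
      rw [List.nodup_append]
      refine ⟨h, by simp, ?_⟩
      intro b hb c hc
      rw [List.mem_singleton] at hc
      subst hc
      exact fun he => hm (he ▸ hb)

theorem foldl_addNew_eq_append : ∀ (L T : List Int), ∃ u, L.foldl pvAddNew T = T ++ u := by
  intro L
  induction L with
  | nil => intro T; exact ⟨[], by simp⟩
  | cons a L ih =>
    intro T
    by_cases hm : a ∈ T
    · obtain ⟨u, hu⟩ := ih T
      exact ⟨u, by simp only [List.foldl_cons, pvAddNew, if_pos hm]; exact hu⟩
    · obtain ⟨u, hu⟩ := ih (T ++ [a])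
      exact ⟨a :: u, by simp only [List.foldl_cons, pvAddNew, if_neg hm]; rw [hu]; simp⟩

theorem pvStep_length_lt {succs : Int → List Int} {S : List Int}
    (h : pvStep succs S ≠ S) : S.length < (pvStep succs S).length := by
  obtain ⟨u, hu⟩ := foldl_addNew_eq_append (S.flatMap succs) S
  unfold pvStep at *
  rw [hu] at h ⊢
  cases u with
  | nil => simp at h
  | cons b u => simp

theorem pvIter_stable {succs : Int → List Int} : ∀ (n : Nat) (S : List Int),
    pvStep succs S = S → pvIter succs n S = S := by
  intro n
  induction n with
  | zero => intro S _; rfl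
  | succ n ih =>
    intro S h
    have : pvIter succs (n + 1) S = pvIter succs n S := by simp only [pvIter, h]
    rw [this]; exact ih S h

theorem mem_pvIter_of_mem {succs : Int → List Int} {x : Int} : ∀ (n : Nat) (S : List Int),
    x ∈ S → x ∈ pvIter succs n S := by
  intro n
  induction n with
  | zero => intro S h; exact h
  | succ n ih => intro S h; exact ih _ (mem_foldl_addNew _ _ h)

theorem nodup_pvIter {succs : Int → List Int} : ∀ (n : Nat) (S : List Int),
    S.Nodup → (pvIter succs n S).Nodup := by
  intro n
  induction n with
  | zero => intro S h; exact h
  | succ n ih => intro S h; exact ih _ (nodup_foldl_addNew _ _ h)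

theorem pvStep_subset {succs : Int → List Int} {S T : List Int}
    (hS : S ⊆ T) (hcl : ∀ y ∈ T, succs y ⊆ T) : pvStep succs S ⊆ T := by
  intro x hx
  rcases mem_of_mem_foldl_addNew _ _ hx with h | h
  · exact hS h
  · obtain ⟨y, hy, hxy⟩ := List.mem_flatMap.mp h
    exact hcl y (hS hy) hxy

theorem pvIter_subset {succs : Int → List Int} {T : List Int}
    (hcl : ∀ y ∈ T, succs y ⊆ T) : ∀ (n : Nat) (S : List Int), S ⊆ T → pvIter succs n S ⊆ T := by
  intro n
  induction n with
  | zero => intro S h; exact h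
  | succ n ih => intro S h; exact ih _ (pvStep_subset h hcl)

theorem succs_subset_pvStep {succs : Int → List Int} {S : List Int} {x : Int}
    (hx : x ∈ S) : succs x ⊆ pvStep succs S := by
  intro p hp
  exact mem_foldl_addNew_of_mem_list _ _ (List.mem_flatMap.mpr ⟨x, hx, hp⟩)

theorem nodup_subset_length {S W : List Int} (hn : S.Nodup) (hs : S ⊆ W) :
    S.length ≤ W.length := by
  calc S.length = S.toFinset.card := (List.toFinset_card_of_nodup hn).symm
    _ ≤ W.toFinset.card := Finset.card_le_card (fun x hx =>
        List.mem_toFinset.mpr (hs (List.mem_toFinset.mp hx)))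
    _ ≤ W.length := List.toFinset_card_le W

theorem pvIter_closed_of_fuel {succs : Int → List Int} {W : List Int}
    (hsucc : ∀ x, succs x ⊆ W) : ∀ (N : Nat) (S : List Int), S.Nodup → S ⊆ W →
    W.length < S.length + N → pvStep succs (pvIter succs N S) = pvIter succs N S := by
  intro N
  induction N with
  | zero =>
    intro S hn hs hlen
    exact absurd (nodup_subset_length hn hs) (by omega)
  | succ n ih =>
    intro S hn hs hlen
    by_cases h : pvStep succs S = S
    · simp only [pvIter, h, pvIter_stable n S h]
    · simp only [pvIter]
      apply ih
      · exact nodup_foldl_addNew _ _ hn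
      · exact pvStep_subset hs (fun y _ => hsucc y)
      · have := pvStep_length_lt h; omega

theorem pvGet?_mem {β : Type} {row : List (Int × β)} {d : Int} {ps : β}
    (h : pvGet? row d = some ps) : (d, ps) ∈ row := by
  unfold pvGet? at h
  induction row with
  | nil => simp [List.lookup] at h
  | cons kv rest ih =>
    cases kv with
    | mk k v =>
      simp only [List.lookup_cons] at h
      by_cases hk : d == k
      · simp [hk] at h
        have : d = k := by simpa using hk
        subst this; subst h
        exact List.mem_cons_self
      · simp [hk] at h
        exact List.mem_cons_of_mem _ (ih h)

theorem pvSuccs_subset_vals (predecessors : List (Int × List (Int × List Int))) (origin : Int)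
    (d : Int) : pvSuccs predecessors origin d ⊆ pvVals predecessors origin := by
  unfold pvSuccs
  split
  · exact List.nil_subset _
  · unfold pvPreds
    cases hg : pvGet? (pvRow predecessors origin) d with
    | none => simp only [Option.getD_none]; exact List.nil_subset _
    | some ps =>
      simp only [Option.getD_some]
      intro p hp
      exact List.mem_flatMap.mpr ⟨(d, ps), pvGet?_mem hg, hp⟩

theorem pvDedup_subset {L : List Int} : pvDedup L ⊆ L := by
  intro x hx
  rcases mem_of_mem_foldl_addNew _ _ hx with h | h
  · simp at h
  · exact h

theorem mem_pvDedup {L : List Int} {x : Int} (h : x ∈ L) : x ∈ pvDedup L :=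
  mem_foldl_addNew_of_mem_list _ _ h

theorem nodup_pvDedup (L : List Int) : (pvDedup L).Nodup :=
  nodup_foldl_addNew _ _ List.nodup_nil

theorem mem_pvCl_of_mem {predecessors : List (Int × List (Int × List Int))} {origin : Int}
    {S0 : List Int} {d : Int} (h : d ∈ S0) : d ∈ pvCl predecessors origin S0 :=
  mem_pvIter_of_mem _ _ (mem_pvDedup h)

theorem nodup_pvCl (predecessors : List (Int × List (Int × List Int))) (origin : Int)
    (S0 : List Int) : (pvCl predecessors origin S0).Nodup :=
  nodup_pvIter _ _ (nodup_pvDedup S0)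

theorem pvCl_closed {predecessors : List (Int × List (Int × List Int))} {origin : Int}
    {S0 : List Int} {x : Int} (hx : x ∈ pvCl predecessors origin S0) :
    pvSuccs predecessors origin x ⊆ pvCl predecessors origin S0 := by
  have hstable : pvStep (pvSuccs predecessors origin) (pvCl predecessors origin S0)
      = pvCl predecessors origin S0 := by
    apply pvIter_closed_of_fuel (W := pvDedup (S0 ++ pvVals predecessors origin))
    · intro y p hp
      exact mem_pvDedup (List.mem_append_right _ (pvSuccs_subset_vals _ _ y hp))
    · exact nodup_pvDedup S0
    · intro y hy
      exact mem_pvDedup (List.mem_append_left _ (pvDedup_subset hy))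
    · omega
  calc pvSuccs predecessors origin x
      ⊆ pvStep (pvSuccs predecessors origin) (pvCl predecessors origin S0) :=
        succs_subset_pvStep hx
    _ = pvCl predecessors origin S0 := hstable

theorem pvCl_subset_vals {predecessors : List (Int × List (Int × List Int))} {origin : Int}
    {S0 : List Int} (h : S0 ⊆ pvVals predecessors origin) :
    pvCl predecessors origin S0 ⊆ pvVals predecessors origin := by
  apply pvIter_subset
  · intro y _; exact pvSuccs_subset_vals _ _ y
  · exact fun x hx => h (pvDedup_subset hx)

-- the measure that makes both recursions terminate under Pre_: the size of the pop-closure of d's successors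
def pvM (predecessors : List (Int × List (Int × List Int))) (origin : Int) (d : Int) : Nat :=
  (pvCl predecessors origin (pvSuccs predecessors origin d)).length

theorem pvM_le (predecessors : List (Int × List (Int × List Int))) (origin : Int) (d : Int) :
    pvM predecessors origin d ≤ (pvVals predecessors origin).length :=
  nodup_subset_length (nodup_pvCl _ _ _) (pvCl_subset_vals (pvSuccs_subset_vals _ _ d))

theorem pvM_lt {predecessors : List (Int × List (Int × List Int))} {origin : Int} {d p : Int}
    (hp : p ∈ pvSuccs predecessors origin d)
    (hacycp : p ∉ pvCl predecessors origin (pvSuccs predecessors origin p)) :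
    pvM predecessors origin p < pvM predecessors origin d := by
  have hpCd : p ∈ pvCl predecessors origin (pvSuccs predecessors origin d) :=
    mem_pvCl_of_mem hp
  have hsub : pvCl predecessors origin (pvSuccs predecessors origin p)
      ⊆ pvCl predecessors origin (pvSuccs predecessors origin d) := by
    apply pvIter_subset
    · intro y hy; exact pvCl_closed hy
    · exact fun x hx => pvCl_closed hpCd (pvDedup_subset hx)
  have hss : (pvCl predecessors origin (pvSuccs predecessors origin p)).toFinset
      ⊂ (pvCl predecessors origin (pvSuccs predecessors origin d)).toFinset := by
    constructor
    · intro x hx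
      exact List.mem_toFinset.mpr (hsub (List.mem_toFinset.mp hx))
    · intro hrev
      exact hacycp (List.mem_toFinset.mp (hrev (List.mem_toFinset.mpr hpCd)))
  have := Finset.card_lt_card hss
  unfold pvM
  rwa [List.toFinset_card_of_nodup (nodup_pvCl _ _ _),
    List.toFinset_card_of_nodup (nodup_pvCl _ _ _)] at this

theorem edges_origin (predecessors : List (Int × List (Int × List Int))) (origin : Int) (f : Nat) :
    recover_tree_edges predecessors origin f origin = [] := by
  cases f <;> simp [recover_tree_edges]

theorem cost_origin (row : List (Int × List Int)) (origin : Int) {f : Nat} (h : 1 ≤ f) :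
    recover_tree_cost row origin f origin = 1 := by
  cases f with
  | zero => omega
  | succ n => simp [recover_tree_cost]

theorem cost_pos (row : List (Int × List Int)) (origin : Int) {f : Nat} (h : 1 ≤ f) (d : Int) :
    1 ≤ recover_tree_cost row origin f d := by
  cases f with
  | zero => omega
  | succ n =>
    simp only [recover_tree_cost]
    split <;> omega

theorem succs_eq_preds {predecessors : List (Int × List (Int × List Int))} {origin d : Int}
    (h : ¬ d = origin) :
    pvSuccs predecessors origin d = pvPreds (pvRow predecessors origin) d := by
  simp [pvSuccs, h]

theorem edges_congr {predecessors : List (Int × List (Int × List Int))} {origin : Int}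
    {Call : List Int}
    (hclosed : ∀ x ∈ Call, pvSuccs predecessors origin x ⊆ Call)
    (hacyc : ∀ x ∈ Call, x ∉ pvCl predecessors origin (pvSuccs predecessors origin x)) :
    ∀ (f1 f2 : Nat) (d : Int), d ∈ Call →
      pvM predecessors origin d < f1 → pvM predecessors origin d < f2 →
      recover_tree_edges predecessors origin f1 d = recover_tree_edges predecessors origin f2 d := by
  intro f1
  induction f1 with
  | zero => intro f2 d _ h1 _; omega
  | succ a ih =>
    intro f2 d hd h1 h2
    cases f2 with
    | zero => omega
    | succ b =>
      by_cases hdo : d = origin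
      · simp [recover_tree_edges, hdo]
      · simp only [recover_tree_edges, hdo, if_false]
        congr 1
        rw [PySem.List.foldl_append_eq_flatMap, PySem.List.foldl_append_eq_flatMap]
        simp only [List.nil_append]
        apply List.flatMap_congr
        intro p hp
        have hp' : p ∈ pvSuccs predecessors origin d := by
          rw [succs_eq_preds hdo]; exact List.mem_reverse.mp hp
        have hpc : p ∈ Call := hclosed d hd hp'
        have hm : pvM predecessors origin p < pvM predecessors origin d :=
          pvM_lt hp' (hacyc p hpc)
        exact ih b p hpc (by omega) (by omega)

theorem cost_congr {predecessors : List (Int × List (Int × List Int))} {origin : Int}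
    {Call : List Int}
    (hclosed : ∀ x ∈ Call, pvSuccs predecessors origin x ⊆ Call)
    (hacyc : ∀ x ∈ Call, x ∉ pvCl predecessors origin (pvSuccs predecessors origin x)) :
    ∀ (f1 f2 : Nat) (d : Int), d ∈ Call →
      pvM predecessors origin d + 2 ≤ f1 → pvM predecessors origin d + 2 ≤ f2 →
      recover_tree_cost (pvRow predecessors origin) origin f1 d
        = recover_tree_cost (pvRow predecessors origin) origin f2 d := by
  intro f1
  induction f1 with
  | zero => intro f2 d _ h1 _; omega
  | succ a ih =>
    intro f2 d hd h1 h2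
    cases f2 with
    | zero => omega
    | succ b =>
      by_cases hod : origin = d
      · simp [recover_tree_cost, hod]
      · simp only [recover_tree_cost, hod, if_false]
        congr 2
        apply List.map_congr_left
        intro p hp
        have hp' : p ∈ pvSuccs predecessors origin d := by
          rw [succs_eq_preds (fun h => hod h.symm)]; exact hp
        have hpc : p ∈ Call := hclosed d hd hp'
        have hm : pvM predecessors origin p < pvM predecessors origin d :=
          pvM_lt hp' (hacyc p hpc)
        exact ih b p hpc (by omega) (by omega)

theorem edges_succ (predecessors : List (Int × List (Int × List Int))) (origin : Int) (f : Nat) (d : Int)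
    (hd : ¬ d = origin) :
    recover_tree_edges predecessors origin (f + 1) d =
      (pvPreds (pvRow predecessors origin) d).map (fun p => (p, d)) ++
        (pvPreds (pvRow predecessors origin) d).reverse.flatMap (recover_tree_edges predecessors origin f) := by
  simp only [recover_tree_edges, if_neg hd]
  rw [PySem.List.foldl_append_eq_flatMap, List.nil_append]

theorem loop_eq_alt (predecessors : List (Int × List (Int × List Int))) (origin : Int)
    (Call : List Int)
    (hclosed : ∀ x ∈ Call, pvSuccs predecessors origin x ⊆ Call)
    (hacyc : ∀ x ∈ Call, x ∉ pvCl predecessors origin (pvSuccs predecessors origin x)) :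
    ∀ (fuel : Nat) (destinations : List Int) (tree : List (Int × Int)),
      (∀ d ∈ destinations, d ∈ Call) →
      (destinations.map (recover_tree_cost (pvRow predecessors origin) origin
        ((pvVals predecessors origin).length + 2))).sum ≤ fuel →
      recover_tree_loop predecessors origin fuel destinations tree =
        destinations.reverse.foldl
          (fun acc d => acc ++ recover_tree_edges predecessors origin ((pvVals predecessors origin).length + 1) d)
          tree := by
  intro fuel
  induction fuel with
  | zero =>
    intro dests tree hgood hsum
    cases dests with
    | nil => simp [recover_tree_loop]
    | cons d rest =>
      exfalso
      have h1 := cost_pos (pvRow predecessors origin) origin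
        (f := (pvVals predecessors origin).length + 2) (by omega) d
      simp only [List.map_cons, List.sum_cons] at hsum
      omega
  | succ n ih =>
    intro dests tree hgood hsum
    by_cases h : dests = []
    · simp [recover_tree_loop, h]
    · set row := pvRow predecessors origin with hrowdef
      set M := (pvVals predecessors origin).length with hM
      set d := dests.getLast h with hdd
      set init := dests.dropLast with hinit
      have hsplit : init ++ [d] = dests := List.dropLast_concat_getLast h
      have hdmem : d ∈ dests := List.getLast_mem h
      have hdc : d ∈ Call := hgood d hdmem
      have hgoodinit : ∀ x ∈ init, x ∈ Call := by
        intro x hx; exact hgood x (List.mem_of_mem_dropLast hx)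
      have hsum' : (init.map (recover_tree_cost row origin (M + 2))).sum
            + recover_tree_cost row origin (M + 2) d ≤ n + 1 := by
        rw [← hsplit] at hsum
        simpa using hsum
      have hrev : dests.reverse = d :: init.reverse := by
        rw [← hsplit]; simp
      by_cases hod : origin = d
      · simp only [recover_tree_loop, dif_neg h, ← hdd, if_pos hod]
        have hcost : recover_tree_cost row origin (M + 2) d = 1 := by
          rw [← hod]; exact cost_origin _ _ (by omega)
        rw [ih init tree hgoodinit (by omega), hrev]
        simp only [List.foldl_cons, ← hod, edges_origin, List.append_nil]
      · simp only [recover_tree_loop, dif_neg h, ← hdd, if_neg hod]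
        have hdo : ¬ d = origin := fun hh => hod hh.symm
        set ps := pvPreds row d with hps
        have hsd : pvSuccs predecessors origin d = ps := by
          rw [succs_eq_preds hdo, ← hrowdef]
        have hpsc : ∀ p ∈ ps, p ∈ Call := by
          intro p hp; exact hclosed d hdc (by rw [hsd]; exact hp)
        have hpm : ∀ p ∈ ps, pvM predecessors origin p < pvM predecessors origin d := by
          intro p hp
          exact pvM_lt (by rw [hsd]; exact hp) (hacyc p (hpsc p hp))
        have hdM : pvM predecessors origin d ≤ M := pvM_le predecessors origin d
        have hfold : ps.foldl
            (fun acc p => (acc.1 ++ [(p, d)], acc.2 ++ [p])) (tree, init)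
            = (tree ++ ps.map (fun p => (p, d)), init ++ ps) := by
          rw [PySem.List.foldl_prod_mk (f := fun acc p => acc ++ [(p, d)]) (g := fun acc p => acc ++ [p])]
          rw [PySem.List.foldl_append_singleton_eq_map, PySem.List.foldl_append_singleton_eq_self]
        rw [← hinit, hfold]
        have hgood' : ∀ x ∈ init ++ ps, x ∈ Call := by
          intro x hx
          rcases List.mem_append.mp hx with hx | hx
          · exact hgoodinit x hx
          · exact hpsc x hx
        have hcostp : ∀ p ∈ ps, recover_tree_cost row origin (M + 1) p
            = recover_tree_cost row origin (M + 2) p := by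
          intro p hp
          have := hpm p hp
          rw [hrowdef]
          exact cost_congr hclosed hacyc (M + 1) (M + 2) p (hpsc p hp) (by omega) (by omega)
        have hcostd : recover_tree_cost row origin (M + 2) d
            = 1 + (ps.map (recover_tree_cost row origin (M + 1))).sum := by
          show recover_tree_cost row origin (M + 1 + 1) d = _
          simp only [recover_tree_cost, if_neg hod, ← hps]
        have hcostd' : recover_tree_cost row origin (M + 2) d
            = 1 + (ps.map (recover_tree_cost row origin (M + 2))).sum := by
          rw [hcostd, List.map_congr_left hcostp]
        have hsum2 : ((init ++ ps).map (recover_tree_cost row origin (M + 2))).sum ≤ n := by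
          rw [List.map_append, List.sum_append]
          omega
        rw [ih (init ++ ps) _ hgood' hsum2]
        have hedgesp : ∀ p ∈ ps.reverse, recover_tree_edges predecessors origin M p
            = recover_tree_edges predecessors origin (M + 1) p := by
          intro p hp
          have hp' : p ∈ ps := List.mem_reverse.mp hp
          have := hpm p hp'
          exact edges_congr hclosed hacyc M (M + 1) p (hpsc p hp') (by omega) (by omega)
        have hedged : recover_tree_edges predecessors origin (M + 1) d
            = ps.map (fun p => (p, d)) ++ ps.reverse.flatMap (recover_tree_edges predecessors origin (M + 1)) := by
          rw [edges_succ predecessors origin M d hdo, ← hrowdef, ← hps,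
            List.flatMap_congr hedgesp]
        rw [hrev]
        simp only [List.foldl_cons, List.reverse_append, List.foldl_append]
        rw [hedged, PySem.List.foldl_append_eq_flatMap]
        simp [List.flatMap, List.map_reverse, List.append_assoc]

-- ===== VERDICT (by name: the statement is the Claim_ definition above) =====
theorem recover_tree_spec : Claim_equal_recover_tree := by
  intro predecessors origin destinations tree _ hpre
  unfold Spec_recover_tree recover_tree recover_tree_alt
  exact loop_eq_alt predecessors origin (pvCl predecessors origin destinations)
    (fun x hx => pvCl_closed hx)
    (fun x hx => (hpre x hx).2)
    _ destinations tree
    (fun d hd => mem_pvCl_of_mem hd)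
    le_rfl
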